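-- pv_equiv track=rewrite | github.com/Procrat/typy | examples/davit/reeks_08/Dumas.py | codeersleutel
-- ===== SOURCE A (Python) =====
-- def codeersleutel(sleutel):
--     key = sleutel.replace(" ", "").upper()
--     dict = {}
--     for i in range(len(key)):
--         if(key[i] in dict):
--             dict[key[i]].append(i+1)
--         else:
--             dict[key[i]] = [i+1]
--     return dict
-- ===== SOURCE B (Python) =====
-- def codeersleutel(sleutel):
--     key = sleutel.replace(" ", "").upper()
--     return {c: [i + 1 for i, ch in enumerate(key) if ch == c]
--             for c in dict.fromkeys(key)}
-- ===== Notes on version B (the rewrite author's own statement) =====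
-- stated objective: idiomatic
-- what changed: Replaces the single mutating accumulation loop (membership test + append/insert per index) by a dict comprehension: one ordered-dedup pass over the key, then per distinct character a scan of enumerate(key) collecting its 1-based positions.
import Mathlib
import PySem

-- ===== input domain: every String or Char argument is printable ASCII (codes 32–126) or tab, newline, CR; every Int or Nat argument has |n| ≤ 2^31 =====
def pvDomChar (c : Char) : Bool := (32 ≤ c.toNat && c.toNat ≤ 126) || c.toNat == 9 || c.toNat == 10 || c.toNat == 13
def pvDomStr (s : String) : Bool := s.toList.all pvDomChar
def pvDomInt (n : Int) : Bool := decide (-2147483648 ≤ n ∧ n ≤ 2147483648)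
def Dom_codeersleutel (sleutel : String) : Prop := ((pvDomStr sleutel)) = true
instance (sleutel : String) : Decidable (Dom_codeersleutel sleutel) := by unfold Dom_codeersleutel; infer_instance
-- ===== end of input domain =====

-- B rebuilds the mapping as a dict comprehension (ordered dedup of the key, then a per-character scan
-- of enumerate(key)) instead of A's single mutating accumulation loop; objective: idiomatic.


-- ===== PORT A =====
def codeersleutel (sleutel : String) : List (String × List Int) :=
  let key := PySem.Str.upper (PySem.Str.replace sleutel " " "")
  let d := (PySem.List.pyRange 0 (PySem.Str.len key) 1).foldl
    (fun d i =>
      match PySem.Str.pyGet? key i with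
      | some c =>
          if d.contains (String.ofList [c]) then
            PySem.Dict.modify d (String.ofList [c]) [] (fun l => l ++ [i + 1])
          else
            PySem.Dict.insert d (String.ofList [c]) [i + 1]
      | none => d)  -- unreachable: i ranges over range(len(key))
    PySem.Dict.empty
  d.items

-- ===== PORT B =====
def codeersleutel_alt (sleutel : String) : List (String × List Int) :=
  let key := (PySem.Str.upper (PySem.Str.replace sleutel " " "")).toList
  (PySem.Set.ofList key).map (fun c =>
    (String.ofList [c],
     ((PySem.List.enumerate key 0).filter (fun p => p.2 == c)).map (fun p => p.1 + 1)))

-- ===== PRECONDITION & SPEC =====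
def Spec_codeersleutel (sleutel : String) (out : List (String × List Int)) : Prop := out = codeersleutel_alt sleutel
instance (sleutel : String) (out : List (String × List Int)) : Decidable (Spec_codeersleutel sleutel out) := by unfold Spec_codeersleutel; infer_instance

-- ===== CLAIM (what is proved, stated in full; the proofs are below) =====
def Claim_equal_codeersleutel : Prop := ∀ (sleutel : String), Dom_codeersleutel sleutel → Spec_codeersleutel sleutel (codeersleutel sleutel)

-- ===== LEMMAS AND PROOFS =====

theorem strOfList_singleton_inj (a b : Char) (h : String.ofList [a] = String.ofList [b]) : a = b := by
  simpa using congrArg String.toList h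

theorem strOfList_singleton_beq (a b : Char) :
    ((String.ofList [a]) == (String.ofList [b])) = (a == b) := by
  by_cases h : a = b
  · simp [h]
  · have hne : String.ofList [a] ≠ String.ofList [b] := fun hc => h (strOfList_singleton_inj a b hc)
    simp [beq_eq_false_iff_ne.2 hne, beq_eq_false_iff_ne.2 h]

theorem modify_absent (d : PySem.Dict String (List Int)) (k : String) (f : List Int → List Int)
    (h : d.contains k = false) : PySem.Dict.modify d k [] f = PySem.Dict.insert d k (f []) := by
  rw [PySem.Dict.modify, PySem.Dict.getD_of_not_contains (h := h)]

theorem step_eq (d : PySem.Dict String (List Int)) (c : Char) (i : Int) :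
    (if d.contains (String.ofList [c]) then
        PySem.Dict.modify d (String.ofList [c]) [] (fun l => l ++ [i + 1])
      else PySem.Dict.insert d (String.ofList [c]) [i + 1])
    = PySem.Dict.modify d (String.ofList [c]) [] (fun l => l ++ [i + 1]) := by
  by_cases h : d.contains (String.ofList [c]) = true
  · simp [h]
  · rw [if_neg (by simp [h]), modify_absent _ _ _ (by simpa using h)]
    simp

theorem ofList_map_inj (g : Char → String) (hg : ∀ a b, g a = g b → a = b) (xs : List Char) :
    PySem.Set.ofList (xs.map g) = (PySem.Set.ofList xs).map g := by
  induction xs using List.reverseRecOn with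
  | nil => simp [PySem.Set.ofList_nil]
  | append_singleton xs x ih =>
      rw [List.map_append, List.map_singleton, PySem.Set.ofList_append_singleton,
          PySem.Set.ofList_append_singleton, ih]
      by_cases hx : x ∈ PySem.Set.ofList xs
      · rw [PySem.Set.add_of_mem hx, PySem.Set.add_of_mem (List.mem_map_of_mem hx)]
      · have hx' : g x ∉ List.map g (PySem.Set.ofList xs) := by
          intro hmem
          obtain ⟨a, ha, hga⟩ := List.mem_map.1 hmem
          exact hx (hg a x hga ▸ ha)
        rw [PySem.Set.add_of_not_mem hx, PySem.Set.add_of_not_mem hx',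
            List.map_append, List.map_singleton]

-- A's loop over indices equals the modify-loop over enumerate
theorem loopA_eq (key : List Char) :
    (PySem.List.pyRange 0 (key.length : Int) 1).foldl
      (fun d i =>
        match PySem.List.pyGet? key i with
        | some c =>
            if d.contains (String.ofList [c]) then
              PySem.Dict.modify d (String.ofList [c]) [] (fun l => l ++ [i + 1])
            else PySem.Dict.insert d (String.ofList [c]) [i + 1]
        | none => d) PySem.Dict.empty
    = (PySem.List.enumerate key 0).foldl
        (fun d p => PySem.Dict.modify d (String.ofList [p.2]) [] (fun l => l ++ [p.1 + 1]))
        PySem.Dict.empty := by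
  rw [PySem.List.enumerate_eq_map_pyRange (d := 'A'), List.foldl_map]
  refine PySem.List.foldl_congr_mem _ _ _ _ (fun acc i hi => ?_)
  obtain ⟨h0, hlt⟩ := (PySem.List.mem_pyRange_one).1 hi
  have hlt' : i.toNat < key.length := by omega
  rw [PySem.List.pyGet?_eq_some_getElem (h0 := h0) (h1 := by simpa using hlt),
      PySem.List.pyGetD_eq_getElem (h0 := h0) (h1 := by simpa using hlt)]
  exact step_eq acc _ i

theorem main_eq (key : List Char) :
    ((PySem.List.enumerate key 0).foldl
        (fun d p => PySem.Dict.modify d (String.ofList [p.2]) [] (fun l => l ++ [p.1 + 1]))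
        PySem.Dict.empty).items
    = (PySem.Set.ofList key).map (fun c =>
        (String.ofList [c],
         ((PySem.List.enumerate key 0).filter (fun p => p.2 == c)).map (fun p => p.1 + 1))) := by
  have hET :
      (PySem.List.enumerate key 0).foldl
        (fun d p => PySem.Dict.modify d (String.ofList [p.2]) [] (fun l => l ++ [p.1 + 1]))
        PySem.Dict.empty
      = ((PySem.List.enumerate key 0).map (fun p => (String.ofList [p.2], p.1 + 1))).foldl
          (fun d q => PySem.Dict.modify d q.1 [] (fun l => l ++ [q.2])) PySem.Dict.empty := by
    rw [List.foldl_map]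
  rw [hET]
  have hnodup := PySem.Dict.nodup_keys_foldl_modify_key
      ((PySem.List.enumerate key 0).map (fun p => (String.ofList [p.2], p.1 + 1)))
      (Prod.fst) [] (fun d q l => l ++ [q.2]) PySem.Dict.empty (by simp [PySem.Dict.keys_empty])
  have hkeys :
      (((PySem.List.enumerate key 0).map (fun p => (String.ofList [p.2], p.1 + 1))).foldl
          (fun d q => PySem.Dict.modify d q.1 [] (fun l => l ++ [q.2])) PySem.Dict.empty).keys
      = (PySem.Set.ofList key).map (fun c => String.ofList [c]) := by
    rw [PySem.Dict.keys_foldl_modify_key, PySem.Dict.keys_empty, PySem.Set.update_nil_left,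
        List.map_map]
    have h1 : ((fun (q : String × Int) => q.1) ∘ (fun (p : Int × Char) => (String.ofList [p.2], p.1 + 1)))
        = (fun c => String.ofList [c]) ∘ (fun (p : Int × Char) => p.2) := rfl
    rw [h1, ← List.map_map, PySem.List.map_snd_enumerate,
        ofList_map_inj _ (strOfList_singleton_inj)]
  have hgetD : ∀ c : Char,
      PySem.Dict.getD
        (((PySem.List.enumerate key 0).map (fun p => (String.ofList [p.2], p.1 + 1))).foldl
          (fun d q => PySem.Dict.modify d q.1 [] (fun l => l ++ [q.2])) PySem.Dict.empty)
        (String.ofList [c]) []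
      = ((PySem.List.enumerate key 0).filter (fun p => p.2 == c)).map (fun p => p.1 + 1) := by
    intro c
    rw [PySem.Dict.getD_foldl_modify_append, PySem.Dict.getD_empty, List.nil_append,
        List.filter_map, List.map_map]
    have hp : ((fun (q : String × Int) => q.1 == String.ofList [c]) ∘
        (fun (p : Int × Char) => (String.ofList [p.2], p.1 + 1)))
        = (fun (p : Int × Char) => p.2 == c) := by
      funext p
      simp only [Function.comp_apply, strOfList_singleton_beq]
    rw [hp]
    rfl
  rw [PySem.Dict.items_eq_map_keys _ hnodup [], hkeys, List.map_map]
  refine List.map_congr_left (fun c _ => ?_)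
  simp only [Function.comp]
  rw [hgetD c]

-- ===== VERDICT (by name: the statement is the Claim_ definition above) =====
theorem codeersleutel_spec : Claim_equal_codeersleutel := by
  intro sleutel _
  unfold Spec_codeersleutel codeersleutel codeersleutel_alt
  simp only [PySem.Str.len_eq, PySem.Str.pyGet?_eq, PySem.Chars.pyGet?_eq_listPyGet?]
  rw [loopA_eq, main_eq]
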